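-- pv_equiv track=rewrite | github.com/pushkarjajoria/lyrics-aligner | create_global_w2phdict.py | backtracking_decode
-- ===== SOURCE A (Python) =====
-- phonemes = ["AA","AE","AH","AO","AW","AY","B","CH","D","DH","EH","ER",
--             "EY","F","G","HH","IH","IY","JH","K","L","M","N","NG",
--             "OW","OY","P","R","S","SH","T","TH","UH","UW","V","W","Y","Z","ZH"]
--
-- def backtracking_decode(s):
--     memo = {}
--
--     def helper(i):
--         if i == len(s):
--             return [[]]  # reached end successfully
--         if i in memo:
--             return memo[i]
--         solutions = []
--         # Try a 2-letter phoneme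
--         if i+2 <= len(s) and s[i:i+2] in phonemes:
--             for tail in helper(i+2):
--                 solutions.append([s[i:i+2]] + tail)
--         # Try a 1-letter phoneme
--         if s[i:i+1] in phonemes:
--             for tail in helper(i+1):
--                 solutions.append([s[i:i+1]] + tail)
--         memo[i] = solutions
--         return solutions
--
--     sols = helper(0)
--     return sols  # list of lists of phoneme tokens (may be empty)
-- ===== SOURCE B (Python) =====
-- phonemes = ["AA","AE","AH","AO","AW","AY","B","CH","D","DH","EH","ER",
--             "EY","F","G","HH","IH","IY","JH","K","L","M","N","NG",
--             "OW","OY","P","R","S","SH","T","TH","UH","UW","V","W","Y","Z","ZH"]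
--
-- def backtracking_decode(s):
--     n = len(s)
--     dp = [None] * (n + 1)
--     dp[n] = [[]]  # empty suffix: one empty segmentation
--     for i in range(n - 1, -1, -1):
--         cur = []
--         if i + 2 <= n and s[i:i+2] in phonemes:
--             for tail in dp[i+2]:
--                 cur.append([s[i:i+2]] + tail)
--         if s[i:i+1] in phonemes:
--             for tail in dp[i+1]:
--                 cur.append([s[i:i+1]] + tail)
--         dp[i] = cur
--     return dp[0]
-- ===== Notes on version B (the rewrite author's own statement) =====
-- stated objective: alternative
-- what changed: Replaced the top-down memoized recursion with an explicit bottom-up DP table filled from the end of the string, reading back dp[0].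
import Mathlib
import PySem

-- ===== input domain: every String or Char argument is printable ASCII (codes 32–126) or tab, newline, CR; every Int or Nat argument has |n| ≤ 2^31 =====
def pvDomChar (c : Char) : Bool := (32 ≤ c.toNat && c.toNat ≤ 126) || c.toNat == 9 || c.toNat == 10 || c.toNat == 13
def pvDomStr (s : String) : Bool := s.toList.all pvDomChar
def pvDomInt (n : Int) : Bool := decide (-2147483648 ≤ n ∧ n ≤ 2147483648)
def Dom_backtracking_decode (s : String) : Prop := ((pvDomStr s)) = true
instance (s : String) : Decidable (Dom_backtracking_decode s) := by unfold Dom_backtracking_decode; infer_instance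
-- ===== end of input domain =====

-- B replaces A's top-down memoized recursion by an explicit bottom-up DP table (alternative
-- decomposition, same output); A's memo is a pure cache of helper's values, so A is ported as
-- the recursion the memo caches (same values, same order).

-- ===== PORT A =====
def pvPhonemes : List String := ["AA","AE","AH","AO","AW","AY","B","CH","D","DH","EH","ER",
  "EY","F","G","HH","IH","IY","JH","K","L","M","N","NG",
  "OW","OY","P","R","S","SH","T","TH","UH","UW","V","W","Y","Z","ZH"]

-- helper(i) acting on the suffix s[i:]; s[i:i+2] / s[i:i+1] are the first two / first one chars
def backtracking_decode_helper : List Char → List (List String)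
  | [] => [[]]
  | c :: rest =>
    (match rest with
     | d :: rest2 =>
       if String.ofList [c, d] ∈ pvPhonemes then
         (backtracking_decode_helper rest2).map (fun tail => String.ofList [c, d] :: tail)
       else []
     | [] => []) ++
    (if String.ofList [c] ∈ pvPhonemes then
       (backtracking_decode_helper rest).map (fun tail => String.ofList [c] :: tail)
     else [])

def backtracking_decode (s : String) : List (List String) :=
  backtracking_decode_helper s.toList

-- ===== PORT B =====
-- dp entry for position i, given the suffix s[i+1:] and the table [dp[i+1], dp[i+2], …]
def pvStep (c : Char) (rest : List Char) (tbl : List (List (List String))) : List (List String) :=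
  (match rest, tbl with
   | d :: _, _ :: dp2 :: _ =>
     if String.ofList [c, d] ∈ pvPhonemes then dp2.map (fun tail => String.ofList [c, d] :: tail) else []
   | _, _ => []) ++
  (match tbl with
   | dp1 :: _ => if String.ofList [c] ∈ pvPhonemes then dp1.map (fun tail => String.ofList [c] :: tail) else []
   | [] => [])

-- the DP table [dp[i], dp[i+1], …, dp[n]] built back-to-front (the loop i = n-1 … 0)
def pvTable : List Char → List (List (List String))
  | [] => [[[]]]
  | c :: rest => pvStep c rest (pvTable rest) :: pvTable rest

def backtracking_decode_alt (s : String) : List (List String) :=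
  (pvTable s.toList).headD []

-- ===== PRECONDITION & SPEC =====
def Spec_backtracking_decode (s : String) (out : List (List String)) : Prop := out = backtracking_decode_alt s
instance (s : String) (out : List (List String)) : Decidable (Spec_backtracking_decode s out) := by unfold Spec_backtracking_decode; infer_instance

-- ===== CLAIM (what is proved, stated in full; the proofs are below) =====
def Claim_equal_backtracking_decode : Prop := ∀ (s : String), Dom_backtracking_decode s → Spec_backtracking_decode s (backtracking_decode s)

-- ===== LEMMAS AND PROOFS =====
-- the table holds exactly helper's value for every suffix
theorem pvTable_eq_tails (cs : List Char) :
    pvTable cs = cs.tails.map backtracking_decode_helper := by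
  induction cs with
  | nil => simp [pvTable, backtracking_decode_helper]
  | cons c rest ih =>
    rw [pvTable, ih, List.tails_cons, List.map_cons]
    congr 1
    cases rest with
    | nil => simp [pvStep, backtracking_decode_helper]
    | cons d rest2 =>
      cases rest2 <;> simp [pvStep, backtracking_decode_helper]

-- ===== VERDICT (by name: the statement is the Claim_ definition above) =====
theorem backtracking_decode_spec : Claim_equal_backtracking_decode := by
  intro s _
  unfold Spec_backtracking_decode backtracking_decode backtracking_decode_alt
  rw [pvTable_eq_tails]
  cases s.toList with
  | nil => simp [backtracking_decode_helper]
  | cons c rest => rw [List.tails_cons, List.map_cons, List.headD_cons]
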